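-- pv_equiv track=rewrite | github.com/dagopian/PBIL | PBIL.py | BITtoGene
-- ===== SOURCE A (Python) =====
-- def BITtoGene(bit_vector):  # Takes a bitarray object
--     # The bit_vector is composed of multiple bytes aligned one after the other
--     # 8 bits = 1 byte
--     # 1 byte is translated into 1 integer
--
--     #  /! ONLY WORKS WITH INTEGER /!\
--
--     byte_list = [bit_vector[x:x+8] for x in range(0,len(bit_vector),8)]  # Splits the bitvector in a list of byte
--
--     gene = []
--
--     for byte in byte_list: # Translates the byte list in list of int
--         out = 0
--         for bit in byte:
--             out = (out << 1) | bit  # Magic : byte to int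
--         gene.append(out)
--
--     return gene
-- ===== SOURCE B (Python) =====
-- def BITtoGene(bit_vector):
--     # Single pass: running accumulator + bit counter, no intermediate byte list.
--     gene = []
--     out = 0
--     count = 0
--     for bit in bit_vector:
--         out = (out << 1) | bit
--         count += 1
--         if count == 8:
--             gene.append(out)
--             out = 0
--             count = 0
--     if count > 0:
--         gene.append(out)
--     return gene
-- ===== Notes on version B (the rewrite author's own statement) =====
-- stated objective: simpler
-- what changed: Replaces the slice-into-byte-chunks pass plus a nested byte-decoding loop with one single pass over the bits that maintains a running accumulator and a bit counter, flushing every 8 bits; no intermediate byte list is built.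
import Mathlib
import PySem

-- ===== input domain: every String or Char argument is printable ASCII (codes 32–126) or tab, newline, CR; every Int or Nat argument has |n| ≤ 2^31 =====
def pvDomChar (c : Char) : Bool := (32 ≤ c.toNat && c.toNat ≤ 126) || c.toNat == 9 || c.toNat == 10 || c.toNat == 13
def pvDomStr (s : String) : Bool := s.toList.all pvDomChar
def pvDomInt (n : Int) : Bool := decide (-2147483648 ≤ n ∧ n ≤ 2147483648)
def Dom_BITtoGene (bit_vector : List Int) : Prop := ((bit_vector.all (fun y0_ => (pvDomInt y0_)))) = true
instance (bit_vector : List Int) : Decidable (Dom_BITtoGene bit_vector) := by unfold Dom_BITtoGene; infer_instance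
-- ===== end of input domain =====

-- B fuses A's chunking pass and byte-decoding loop into one pass with an accumulator and bit counter (objective: simpler).

-- ===== PORT A =====
def BITtoGene (bit_vector : List Int) : List Int :=
  -- byte_list = [bit_vector[x:x+8] for x in range(0, len(bit_vector), 8)]
  let byte_list :=
    (PySem.List.pyRange 0 (bit_vector.length : Int) 8).map
      (fun x => PySem.List.slice bit_vector (some x) (some (x + 8)))
  -- gene = []; for byte in byte_list: out = 0; for bit in byte: out = (out << 1) | bit; gene.append(out)
  byte_list.foldl
    (fun gene byte =>
      gene ++ [byte.foldl (fun out bit => PySem.Int.bor (out <<< (1 : Nat)) bit) 0])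
    []

-- ===== PORT B =====
-- the for-loop of Source B over the remaining bits, with state (gene, out, count)
def pvAltLoop (l : List Int) (gene : List Int) (out : Int) (count : Nat) : List Int :=
  match l with
  | [] => if count > 0 then gene ++ [out] else gene
  | bit :: rest =>
    let out' := PySem.Int.bor (out <<< (1 : Nat)) bit
    if count + 1 == 8 then pvAltLoop rest (gene ++ [out']) 0 0
    else pvAltLoop rest gene out' (count + 1)

def BITtoGene_alt (bit_vector : List Int) : List Int :=
  pvAltLoop bit_vector [] 0 0

-- ===== PRECONDITION & SPEC =====
def Spec_BITtoGene (bit_vector : List Int) (out : List Int) : Prop := out = BITtoGene_alt bit_vector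
instance (bit_vector : List Int) (out : List Int) : Decidable (Spec_BITtoGene bit_vector out) := by unfold Spec_BITtoGene; infer_instance

-- ===== CLAIM (what is proved, stated in full; the proofs are below) =====
def Claim_equal_BITtoGene : Prop := ∀ (bit_vector : List Int), Dom_BITtoGene bit_vector → Spec_BITtoGene bit_vector (BITtoGene bit_vector)

-- ===== LEMMAS AND PROOFS =====

-- abbreviation for the bit step used by both ports
def pvStep (out bit : Int) : Int := PySem.Int.bor (out <<< (1 : Nat)) bit

-- the chunking both sides compute: successive blocks of 8 bits
def pvChunks (l : List Int) : List (List Int) :=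
  match h : l with
  | [] => []
  | _ :: _ => l.take 8 :: pvChunks (l.drop 8)
termination_by l.length
decreasing_by simp [h]

theorem pvFoldl_append (bl : List (List Int)) (acc : List Int) :
    bl.foldl (fun g b => g ++ [b.foldl pvStep 0]) acc = acc ++ bl.map (fun b => b.foldl pvStep 0) := by
  induction bl generalizing acc with
  | nil => simp
  | cons b bl ih => simp [List.foldl, ih]

theorem pvRangeChunks (l : List Int) :
    (List.range ((l.length + 7) / 8)).map (fun k => (l.drop (8 * k)).take 8) = pvChunks l := by
  induction hn : l.length using Nat.strong_induction_on generalizing l with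
  | _ n ih =>
    match l with
    | [] =>
      simp only [List.length_nil] at hn
      subst hn
      norm_num [pvChunks]
    | a :: t =>
      have hlen : (a :: t).length = n := hn
      have hn1 : 1 ≤ n := by rw [List.length_cons] at hlen; omega
      have h1 : (n + 7) / 8 = (n - 8 + 7) / 8 + 1 := by omega
      rw [h1, List.range_succ_eq_map]
      simp only [List.map_cons, List.map_map]
      have hdrop : (t.drop 7).length = n - 8 := by
        rw [List.length_drop]; rw [List.length_cons] at hlen; omega
      have ihd := ih (n - 8) (by omega) (t.drop 7) hdrop
      rw [show pvChunks (a :: t) = (a :: t).take 8 :: pvChunks ((a :: t).drop 8) from by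
        rw [pvChunks]]
      simp only [List.drop_succ_cons]
      congr 1
      rw [← ihd]
      apply List.map_congr_left
      intro k _
      simp only [Function.comp_apply, Nat.succ_eq_add_one]
      rw [show 8 * (k + 1) = (8 * k + 7) + 1 from by ring]
      simp only [List.drop_succ_cons, List.drop_drop]
      ring_nf

theorem pvA_eq_chunks (l : List Int) :
    BITtoGene l = (pvChunks l).map (fun b => b.foldl pvStep 0) := by
  show ((PySem.List.pyRange 0 (l.length : Int) 8).map
      (fun x => PySem.List.slice l (some x) (some (x + 8)))).foldl
      (fun gene byte => gene ++ [byte.foldl pvStep 0]) [] = _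
  rw [pvFoldl_append, ← pvRangeChunks l,
    PySem.List.pyRange_of_pos 0 (l.length : Int) (by norm_num)]
  simp only [List.map_map, List.nil_append]
  cases l with
  | nil => simp
  | cons a t =>
    rw [if_pos (by simp : (0 : Int) < ((a :: t).length : Int))]
    have hm : ((((a :: t).length : Int) - 0 + 8 - 1) / 8).toNat = ((a :: t).length + 7) / 8 := by
      omega
    rw [hm]
    apply List.map_congr_left
    intro k _
    simp only [Function.comp_apply]
    congr 1
    rw [show (0 + 8 * (k : Int)) = ((8 * k : Nat) : Int) by push_cast; ring,
      show (((8 * k : Nat) : Int) + 8) = (((8 * k : Nat) : Int) + ((8 : Nat) : Int)) from rfl,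
      PySem.List.slice_natCast_add]

-- Source B's loop, with the gene prefix factored out
def pvProcB (l : List Int) (out : Int) (count : Nat) : List Int :=
  match l with
  | [] => if count > 0 then [out] else []
  | bit :: rest =>
    if count + 1 == 8 then pvStep out bit :: pvProcB rest 0 0
    else pvProcB rest (pvStep out bit) (count + 1)

theorem pvAltLoop_eq (l : List Int) (gene : List Int) (out : Int) (count : Nat) :
    pvAltLoop l gene out count = gene ++ pvProcB l out count := by
  induction l generalizing gene out count with
  | nil => unfold pvAltLoop pvProcB; split <;> simp
  | cons bit rest ih =>
    unfold pvAltLoop pvProcB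
    split
    · rw [ih]; simp [pvStep]
    · rw [ih]; simp [pvStep]

theorem pvProcB_char (l : List Int) (out : Int) (count : Nat) (hc : count < 8) (hl : l ≠ []) :
    pvProcB l out count =
      (l.take (8 - count)).foldl pvStep out ::
        (pvChunks (l.drop (8 - count))).map (fun b => b.foldl pvStep 0) := by
  induction l generalizing out count with
  | nil => exact absurd rfl hl
  | cons bit rest ih =>
    unfold pvProcB
    by_cases h8 : count + 1 = 8
    · rw [if_pos (by simp [h8])]
      have hc7 : count = 7 := by omega
      subst hc7
      simp only [show (8 : Nat) - 7 = 1 from rfl, List.take_succ_cons, List.take_zero,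
        List.drop_succ_cons, List.drop_zero, List.foldl_cons, List.foldl_nil]
      congr 1
      cases rest with
      | nil => simp [pvProcB, pvChunks]
      | cons b t2 =>
        rw [ih 0 0 (by omega) (by simp)]
        simp only [Nat.sub_zero]
        rw [show pvChunks (b :: t2) = (b :: t2).take 8 :: pvChunks ((b :: t2).drop 8) from by
          rw [pvChunks]]
        simp
    · rw [if_neg (by simpa using h8)]
      cases rest with
      | nil =>
        simp only [pvProcB, if_pos (show count + 1 > 0 by omega)]
        obtain ⟨m, hm⟩ : ∃ m, 8 - count = m + 1 := ⟨7 - count, by omega⟩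
        rw [hm]
        simp [pvChunks]
      | cons b t2 =>
        rw [ih (pvStep out bit) (count + 1) (by omega) (by simp)]
        rw [show 8 - count = (8 - (count + 1)) + 1 from by omega]
        simp only [List.take_succ_cons, List.drop_succ_cons, List.foldl_cons]

theorem pvB_eq_chunks (l : List Int) :
    BITtoGene_alt l = (pvChunks l).map (fun b => b.foldl pvStep 0) := by
  unfold BITtoGene_alt
  rw [pvAltLoop_eq]
  cases hl : l with
  | nil => simp [pvProcB, pvChunks]
  | cons a t =>
    rw [pvProcB_char _ 0 0 (by omega) (by simp)]
    simp only [Nat.sub_zero, List.nil_append]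
    rw [pvChunks]
    simp

-- ===== VERDICT (by name: the statement is the Claim_ definition above) =====
theorem BITtoGene_spec : Claim_equal_BITtoGene := by
  intro bv _
  unfold Spec_BITtoGene
  rw [pvA_eq_chunks, pvB_eq_chunks]
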